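-- pv_equiv track=rewrite | github.com/adinaspertus/authorcounter | functions.py | balance_test_set
-- ===== SOURCE A (Python) =====
-- from collections import Counter
--
-- def balance_test_set(X, y, skip_y = []):
--     """Restricts a test X and y set so that y categories (ie author count, or decade)
--     are equally represented in order to accurately test predictive accuracy.
--     Returns a tuple of X and y as lists so that each category will only be represented as often as the least common member.
--     Note: Retains elements in order they are listed in the original list, assuming they have already been randomized.
--     Note: For DECADE, only retains 1990s, 2000s, 2010s, 2020s to exclude possibility of one 1989 article limiting test set size."""
--
--     distribution = Counter(y) # create dictionary saying how many of each category is in test set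
--     minimum = distribution[min(distribution)]  # find category with smallest size
--     newX, newY = [], [] # initialize a pair of blank lists
--     new_counts = Counter() # new y category counter for balanced set
--
--     for x_element, y_element in zip(X, y):
--         if new_counts[y_element] < minimum and y_element not in skip_y: # if we haven't reached the desired number of elements in this category
--
--             # add this pair of X and y to the new list
--             newX.append(x_element)
--             newY.append(y_element)
--
--             # note that we have one more from this category
--             new_counts[y_element] += 1 #note that the new
--
--     return newX, newY
-- ===== SOURCE B (Python) =====
-- from collections import Counter
--
-- def balance_test_set(X, y, skip_y = []):
--     """Group-then-merge rewrite: bucket (index, x, y) triples per category once,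
--     take the first `minimum` of each non-skipped bucket, and merge back into
--     original order by sorting on the stored index."""
--     distribution = Counter(y)
--     minimum = distribution[min(distribution)]
--     buckets = {}
--     for i, (x_element, y_element) in enumerate(zip(X, y)):
--         buckets.setdefault(y_element, []).append((i, x_element, y_element))
--     skip = set(skip_y)
--     chosen = []
--     for category, bucket in buckets.items():
--         if category not in skip:
--             chosen.extend(bucket[:minimum])
--     chosen.sort(key=lambda t: t[0])
--     return [t[1] for t in chosen], [t[2] for t in chosen]
-- ===== Notes on version B (the rewrite author's own statement) =====
-- stated objective: faster
-- what changed: Replaces A's single running-counter scan (per-category quota in a Counter, per-element 'y_element not in skip_y' list scan) by a group-then-merge decomposition: bucket all (index, x, y) triples per category in one pass, take the first `minimum` entries of each non-skipped bucket (skip_y turned into a set once), and merge the selections back into original order by sorting on the stored index.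
import Mathlib
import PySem

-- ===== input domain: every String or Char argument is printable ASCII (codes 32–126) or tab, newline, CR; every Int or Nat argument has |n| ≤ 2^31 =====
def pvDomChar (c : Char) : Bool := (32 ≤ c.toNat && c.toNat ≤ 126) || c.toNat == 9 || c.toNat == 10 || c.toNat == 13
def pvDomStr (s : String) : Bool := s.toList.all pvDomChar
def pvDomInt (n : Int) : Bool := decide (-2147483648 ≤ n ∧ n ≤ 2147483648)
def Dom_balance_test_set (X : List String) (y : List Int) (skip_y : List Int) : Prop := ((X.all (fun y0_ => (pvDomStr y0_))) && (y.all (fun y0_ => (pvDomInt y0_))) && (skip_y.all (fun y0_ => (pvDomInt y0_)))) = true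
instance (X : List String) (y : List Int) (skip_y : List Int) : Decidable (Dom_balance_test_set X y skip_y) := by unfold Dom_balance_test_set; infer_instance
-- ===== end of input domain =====

-- B replaces A's running-counter scan by a group-then-merge pass (bucket per category,
-- take the first `minimum` of each non-skipped bucket, merge back by sorting on the
-- stored original index, with skip_y turned into a set once); measured faster than
-- A's per-element `not in skip_y` list scan on the generated timing inputs.

-- ===== PORT A =====
def balance_test_set (X : List String) (y : List Int) (skip_y : List Int) : List String × List Int :=
  let distribution := PySem.Dict.counter y
  match PySem.List.min? distribution.keys (fun k => k) with
  | none => ([], [])  -- unreachable under Pre_: Python raises ValueError (min of empty Counter)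
  | some mkey =>
    let minimum := distribution.getD mkey 0
    let r := (X.zip y).foldl
      (fun (acc : List String × List Int × PySem.Dict Int Int) p =>
        if acc.2.2.getD p.2 0 < minimum ∧ p.2 ∉ skip_y then
          (acc.1 ++ [p.1], acc.2.1 ++ [p.2], acc.2.2.modify p.2 0 (· + 1))
        else acc)
      ([], [], PySem.Dict.empty)
    (r.1, r.2.1)

-- ===== PORT B =====
def balance_test_set_alt (X : List String) (y : List Int) (skip_y : List Int) : List String × List Int :=
  let distribution := PySem.Dict.counter y
  match PySem.List.min? distribution.keys (fun k => k) with
  | none => ([], [])  -- unreachable under Pre_: Python raises ValueError (min of empty Counter)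
  | some mkey =>
    let minimum := distribution.getD mkey 0
    -- buckets.setdefault(y_element, []).append((i, x_element, y_element))
    let buckets := ((PySem.List.enumerate (X.zip y) 0).map (fun t => (t.2.2, t))).foldl
      (fun (d : PySem.Dict Int (List (Int × String × Int))) p => d.modify p.1 [] (· ++ [p.2]))
      PySem.Dict.empty
    let skip := PySem.Set.ofList skip_y
    let chosen := buckets.items.foldl
      (fun (acc : List (Int × String × Int)) p =>
        if p.1 ∉ skip then acc ++ PySem.List.slice p.2 none (some minimum) else acc)
      []
    let sc := PySem.List.sorted chosen (fun t => t.1) false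
    (sc.map (fun t => t.2.1), sc.map (fun t => t.2.2))

-- ===== PRECONDITION & SPEC =====
-- Pre_ excludes only y = [], on which Python A raises ValueError (min() of an empty Counter).
def Pre_balance_test_set (X : List String) (y : List Int) (skip_y : List Int) : Prop := y ≠ []
instance (X : List String) (y : List Int) (skip_y : List Int) : Decidable (Pre_balance_test_set X y skip_y) := by unfold Pre_balance_test_set; infer_instance
def pvWitness_balance_test_set : List String × List Int × List Int := (["a", "b", "c"], [1, 1, 2], [])

def Spec_balance_test_set (X : List String) (y : List Int) (skip_y : List Int) (out : List String × List Int) : Prop := out = balance_test_set_alt X y skip_y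
instance (X : List String) (y : List Int) (skip_y : List Int) (out : List String × List Int) : Decidable (Spec_balance_test_set X y skip_y out) := by unfold Spec_balance_test_set; infer_instance

-- ===== CLAIM (what is proved, stated in full; the proofs are below) =====
def Claim_equal_balance_test_set : Prop := ∀ (X : List String) (y : List Int) (skip_y : List Int), Dom_balance_test_set X y skip_y → Pre_balance_test_set X y skip_y → Spec_balance_test_set X y skip_y (balance_test_set X y skip_y)

-- ===== LEMMAS AND PROOFS =====

-- The selection both programs compute, written over enumerated triples (index, x, y)
-- with an abstract counter of SEEN occurrences per category.
def pvSpec (skip_y : List Int) (M : Int) : List (Int × String × Int) → (Int → Int) → List (Int × String × Int)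
  | [], _ => []
  | t :: r, c =>
    (if c t.2.2 < M ∧ t.2.2 ∉ skip_y then [t] else []) ++
      pvSpec skip_y M r (fun v => if v = t.2.2 then c v + 1 else c v)

-- A's selection, with an abstract counter of KEPT occurrences per category.
def pvKeep (skip_y : List Int) (M : Int) : List (Int × String × Int) → (Int → Int) → List (Int × String × Int)
  | [], _ => []
  | t :: r, c =>
    if c t.2.2 < M ∧ t.2.2 ∉ skip_y then
      t :: pvKeep skip_y M r (fun v => if v = t.2.2 then c v + 1 else c v)
    else pvKeep skip_y M r c

lemma pvKeep_eq_pvSpec (skip_y : List Int) (M : Int) (l : List (Int × String × Int))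
    (ck cs : Int → Int) (h : ∀ v, v ∉ skip_y → ck v = min (cs v) M) :
    pvKeep skip_y M l ck = pvSpec skip_y M l cs := by
  induction l generalizing ck cs with
  | nil => rfl
  | cons t r ih =>
    simp only [pvKeep, pvSpec]
    by_cases hs : t.2.2 ∈ skip_y
    · rw [if_neg (by rintro ⟨-, h2⟩; exact h2 hs), if_neg (by rintro ⟨-, h2⟩; exact h2 hs),
        List.nil_append]
      refine ih _ _ (fun v hv => ?_)
      have hv2 : v ≠ t.2.2 := fun hh => hv (hh ▸ hs)
      rw [if_neg hv2]
      exact h v hv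
    · have hck := h t.2.2 hs
      by_cases hlt : cs t.2.2 < M
      · rw [if_pos ⟨by omega, hs⟩, if_pos ⟨hlt, hs⟩, List.singleton_append]
        congr 1
        refine ih _ _ (fun v hv => ?_)
        have hcv := h v hv
        by_cases hv2 : v = t.2.2
        · subst hv2; rw [if_pos rfl, if_pos rfl]; omega
        · rw [if_neg hv2, if_neg hv2]; exact hcv
      · rw [if_neg (fun hc : _ ∧ _ => by exact absurd hc.1 (by omega)),
          if_neg (fun hc : _ ∧ _ => hlt hc.1), List.nil_append]
        refine ih _ _ (fun v hv => ?_)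
        have hcv := h v hv
        by_cases hv2 : v = t.2.2
        · subst hv2; rw [if_pos rfl]; omega
        · rw [if_neg hv2]; exact hcv

lemma pvSpec_append_singleton (skip_y : List Int) (M : Int) (l : List (Int × String × Int))
    (t : Int × String × Int) (c : Int → Int) :
    pvSpec skip_y M (l ++ [t]) c = pvSpec skip_y M l c ++
      (if c t.2.2 + ((l.filter (fun u => u.2.2 == t.2.2)).length : Int) < M ∧ t.2.2 ∉ skip_y
        then [t] else []) := by
  induction l generalizing c with
  | nil => simp [pvSpec]
  | cons u r ih =>
    rw [List.cons_append]
    simp only [pvSpec]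
    rw [ih, List.filter_cons, ← List.append_assoc]
    congr 1
    by_cases hu : u.2.2 == t.2.2
    · rw [if_pos hu, List.length_cons]
      have he : (if t.2.2 = u.2.2 then c t.2.2 + 1 else c t.2.2) = c t.2.2 + 1 :=
        if_pos (beq_iff_eq.mp hu).symm
      rw [he]
      refine if_congr (and_congr_left' ?_) rfl rfl
      push_cast
      omega
    · rw [if_neg hu]
      have he : (if t.2.2 = u.2.2 then c t.2.2 + 1 else c t.2.2) = c t.2.2 :=
        if_neg (fun hh => hu (beq_iff_eq.mpr hh.symm))
      rw [he]

lemma pvSpec_sublist (skip_y : List Int) (M : Int) (l : List (Int × String × Int))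
    (c : Int → Int) : (pvSpec skip_y M l c).Sublist l := by
  induction l generalizing c with
  | nil => simp [pvSpec]
  | cons t r ih =>
    simp only [pvSpec]
    split
    · exact List.Sublist.cons₂ t (ih _)
    · exact List.Sublist.cons t (ih _)

-- A's fold over the zipped pairs computes pvKeep (projections thereof).
lemma pvFoldA (skip_y : List Int) (M : Int) (P : List (String × Int)) :
    ∀ (s : Int) (nx : List String) (ny : List Int) (d : PySem.Dict Int Int) (ck : Int → Int),
    (∀ v, d.getD v 0 = ck v) →
    (P.foldl
      (fun (acc : List String × List Int × PySem.Dict Int Int) p =>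
        if acc.2.2.getD p.2 0 < M ∧ p.2 ∉ skip_y then
          (acc.1 ++ [p.1], acc.2.1 ++ [p.2], acc.2.2.modify p.2 0 (· + 1))
        else acc)
      (nx, ny, d)).1 =
        nx ++ (pvKeep skip_y M (PySem.List.enumerate P s) ck).map (fun t => t.2.1) ∧
    (P.foldl
      (fun (acc : List String × List Int × PySem.Dict Int Int) p =>
        if acc.2.2.getD p.2 0 < M ∧ p.2 ∉ skip_y then
          (acc.1 ++ [p.1], acc.2.1 ++ [p.2], acc.2.2.modify p.2 0 (· + 1))
        else acc)
      (nx, ny, d)).2.1 =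
        ny ++ (pvKeep skip_y M (PySem.List.enumerate P s) ck).map (fun t => t.2.2) := by
  induction P with
  | nil => intro s nx ny d ck h; simp [PySem.List.enumerate, pvKeep]
  | cons p r ih =>
    intro s nx ny d ck h
    rw [PySem.List.enumerate_cons]
    simp only [List.foldl_cons, pvKeep, h p.2]
    by_cases hc : ck p.2 < M ∧ p.2 ∉ skip_y
    · rw [if_pos hc, if_pos hc]
      have h' : ∀ v, (d.modify p.2 0 (· + 1)).getD v 0 =
          (fun v => if v = p.2 then ck v + 1 else ck v) v := by
        intro v
        rw [PySem.Dict.getD_modify]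
        by_cases hv : v = p.2 <;> simp [hv, h]
      have := ih (s + 1) (nx ++ [p.1]) (ny ++ [p.2]) _ _ h'
      simpa [List.append_assoc] using this
    · rw [if_neg hc, if_neg hc]
      exact ih (s + 1) nx ny d ck h

-- ---- B side ----

-- bucket contents: the dict built by the modify-append fold maps each category to
-- the in-order list of its triples
lemma pvBucketsGetD (L : List (Int × String × Int)) (c : Int) :
    ((L.map (fun t => (t.2.2, t))).foldl
      (fun (d : PySem.Dict Int (List (Int × String × Int))) p => d.modify p.1 [] (· ++ [p.2]))
      PySem.Dict.empty).getD c [] = L.filter (fun t => t.2.2 == c) := by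
  rw [PySem.Dict.getD_foldl_modify_append]
  rw [PySem.Dict.getD_empty]
  rw [List.filter_map]
  simp [Function.comp_def]

-- replacing one bucket (cat, b) by (cat, b ++ [t]) in the items list changes the
-- flattened choice by at most appending [t], up to permutation
lemma pvFlatReplace (skipset : List Int) (K : Nat) (cat : Int) (b : List (Int × String × Int))
    (t : Int × String × Int)
    (I : List (Int × List (Int × String × Int))) (hnd : (I.map (fun p => p.1)).Nodup)
    (hmem : (cat, b) ∈ I) :
    ((I.map (fun p => if p.1 == cat then (cat, b ++ [t]) else p)).flatMap
        (fun p => if p.1 ∉ skipset then p.2.take K else [])).Perm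
      ((I.flatMap (fun p => if p.1 ∉ skipset then p.2.take K else [])) ++
        (if cat ∉ skipset ∧ b.length < K then [t] else [])) := by
  induction I with
  | nil => simp at hmem
  | cons q I ih =>
    simp only [List.map_cons, List.nodup_cons] at hnd
    by_cases hq : q.1 = cat
    · have hqe : q = (cat, b) := by
        rcases List.mem_cons.mp hmem with hh | hh
        · exact hh.symm
        · exact absurd (hq ▸ List.mem_map.mpr ⟨(cat, b), hh, rfl⟩) hnd.1
      subst hqe
      have htail : I.map (fun p => if p.1 == cat then (cat, b ++ [t]) else p) = I := by
        conv_rhs => rw [← List.map_id I]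
        refine List.map_congr_left (fun a ha => ?_)
        have hane : (a.1 == cat) = false := by
          simp only [beq_eq_false_iff_ne, ne_eq]
          intro hh
          exact hnd.1 (hh ▸ List.mem_map.mpr ⟨a, ha, rfl⟩)
        rw [hane]
        rfl
      have hhead : (if ((cat, b).1 == cat) = true then (cat, b ++ [t]) else (cat, b)) =
          (cat, b ++ [t]) := by simp
      rw [List.map_cons, htail, hhead, List.flatMap_cons, List.flatMap_cons]
      by_cases hs : cat ∈ skipset
    
      · rw [if_neg (fun hh => hh hs), if_neg (fun hh => hh hs),
          if_neg (by rintro ⟨h1, -⟩; exact h1 hs), List.append_nil, List.nil_append]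
      · rw [if_pos hs, if_pos hs]
        by_cases hlen : b.length < K
        · rw [if_pos ⟨hs, hlen⟩]
          have htake : (b ++ [t]).take K = b.take K ++ [t] := by
            rw [List.take_append]
            congr 1
            have h1 : 1 ≤ K - b.length := by omega
            exact List.take_of_length_le (by simpa using h1)
          rw [htake, List.append_assoc, List.append_assoc]
          exact List.Perm.append_left _ List.perm_append_comm
        · rw [if_neg (fun hh : _ ∧ _ => hlen hh.2)]
          have htake : (b ++ [t]).take K = b.take K := by
            rw [List.take_append]
            have h0 : K - b.length = 0 := by omega
            rw [h0]
            simp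
          rw [htake, List.append_nil]
    · have hmem2 : (cat, b) ∈ I := by
        rcases List.mem_cons.mp hmem with hh | hh
        · exact absurd (congrArg Prod.fst hh.symm) hq
        · exact hh
      have hq2 : (q.1 == cat) = false := by simp [hq]
      rw [List.map_cons, hq2]
      simp only [Bool.false_eq_true, if_false]
      rw [List.flatMap_cons, List.flatMap_cons, List.append_assoc]
      exact List.Perm.append_left _ (ih hnd.2 hmem2)

-- the heart of the B-side proof: the flattened per-category choices are a
-- permutation of the in-order selection
lemma pvChosenFlat (S : List Int) (M : Int) (hM : 0 ≤ M)
    (I : List (Int × List (Int × String × Int))) :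
    I.foldl (fun (acc : List (Int × String × Int)) p =>
        if p.1 ∉ S then acc ++ PySem.List.slice p.2 none (some M) else acc) [] =
      I.flatMap (fun p => if p.1 ∉ S then p.2.take M.toNat else []) := by
  rw [PySem.List.foldl_congr_mem I
      (fun (acc : List (Int × String × Int)) p =>
        if p.1 ∉ S then acc ++ PySem.List.slice p.2 none (some M) else acc)
      (fun acc p => acc ++ (if p.1 ∉ S then p.2.take M.toNat else [])) []
      (by intro acc x _
          dsimp only
          split_ifs with h
          · simp
          · rw [PySem.List.slice_to _ hM])]
  rw [PySem.List.foldl_append_eq_flatMap]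
  rw [List.nil_append]

lemma pvChosenPerm (skip_y : List Int) (M : Int) (hM : 0 ≤ M) (L : List (Int × String × Int)) :
    (((L.map (fun t => (t.2.2, t))).foldl
        (fun (d : PySem.Dict Int (List (Int × String × Int))) p => d.modify p.1 [] (· ++ [p.2]))
        PySem.Dict.empty).items.foldl
      (fun (acc : List (Int × String × Int)) p =>
        if p.1 ∉ PySem.Set.ofList skip_y then acc ++ PySem.List.slice p.2 none (some M) else acc)
      []).Perm (pvSpec skip_y M L (fun _ => 0)) := by
  induction L using List.reverseRecOn with
  | nil =>
    rw [pvChosenFlat _ M hM]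
    simp [pvSpec, PySem.Dict.empty]
  | append_singleton L t ih =>
    rw [pvChosenFlat _ M hM] at ih ⊢
    rw [List.map_append, List.foldl_append, List.map_cons, List.map_nil, List.foldl_cons,
      List.foldl_nil]
    set d := (L.map (fun t => (t.2.2, t))).foldl
        (fun (d : PySem.Dict Int (List (Int × String × Int))) p => d.modify p.1 [] (· ++ [p.2]))
        PySem.Dict.empty with hd
    have hmodify : d.modify t.2.2 [] (· ++ [t]) = d.insert t.2.2 (d.getD t.2.2 [] ++ [t]) := rfl
    have hb : d.getD t.2.2 [] = L.filter (fun u => u.2.2 == t.2.2) := pvBucketsGetD L t.2.2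
    have hnd : (d.items.map (fun p => p.1)).Nodup := by
      have := PySem.Dict.nodup_keys_foldl_modify_key (L.map (fun t => (t.2.2, t)))
        (fun p => p.1) [] (fun _ p => (· ++ [p.2])) PySem.Dict.empty
        (PySem.Dict.nodup_keys_empty)
      simpa [PySem.Dict.keys, hd] using this
    simp only [pvSpec_append_singleton]
    by_cases hc : d.contains t.2.2
    · -- existing bucket: one entry is replaced by its extension with t
      obtain ⟨b0, hget⟩ : ∃ v, d.get? t.2.2 = some v := by
        have h1 := PySem.Dict.contains_eq_isSome_get? (d := d) (k := t.2.2)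
        rw [hc] at h1
        exact Option.isSome_iff_exists.mp h1.symm
      have hb0 : d.getD t.2.2 [] = b0 := PySem.Dict.getD_of_get?_eq_some d [] hget
      have hmem : (t.2.2, d.getD t.2.2 []) ∈ d.items := by
        rw [hb0]
        exact PySem.Dict.mem_items_of_get?_eq_some d hget
      rw [hmodify, PySem.Dict.items_insert_of_contains d _ hc]
      refine ((pvFlatReplace (PySem.Set.ofList skip_y) M.toNat t.2.2 (d.getD t.2.2 []) t
        d.items hnd hmem).trans ?_)
      refine List.Perm.append ih ?_
      rw [hb]
      have hext : (if t.2.2 ∉ PySem.Set.ofList skip_y ∧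
            (L.filter (fun u => u.2.2 == t.2.2)).length < M.toNat then [t] else [])
          = (if (0:Int) + ((L.filter (fun u => u.2.2 == t.2.2)).length : Int) < M ∧
            t.2.2 ∉ skip_y then [t] else []) := by
        refine if_congr ?_ rfl rfl
        rw [PySem.Set.mem_ofList]
        constructor
        · rintro ⟨h1, h2⟩; exact ⟨by omega, h1⟩
        · rintro ⟨h1, h2⟩; exact ⟨h2, by omega⟩
      rw [hext]
    · -- fresh bucket: a new singleton entry is appended
      have hcf : d.contains t.2.2 = false := by simpa using hc
      have hbnil : d.getD t.2.2 [] = [] := PySem.Dict.getD_of_not_contains d [] hcf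
      have hcnt : L.filter (fun u => u.2.2 == t.2.2) = [] := by rw [← hb, hbnil]
      rw [hmodify, hbnil, List.nil_append, PySem.Dict.items_insert_of_not_contains d _ hcf]
      rw [List.flatMap_append, List.flatMap_cons, List.flatMap_nil, List.append_nil]
      refine List.Perm.append ih ?_
      rw [hcnt]
      simp only [List.length_nil, Nat.cast_zero, add_zero]
      by_cases hs : t.2.2 ∈ skip_y
      · rw [if_neg (fun hh => hh ((PySem.Set.mem_ofList _ _).mpr hs)),
          if_neg (by rintro ⟨-, h2⟩; exact h2 hs)]
      · rw [if_pos (fun hh => hs ((PySem.Set.mem_ofList _ _).mp hh))]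
        by_cases h0 : 0 < M
        · rw [if_pos ⟨h0, hs⟩]
          have : [t].take M.toNat = [t] := List.take_of_length_le (by simp; omega)
          rw [this]
        · rw [if_neg (by rintro ⟨h1, -⟩; exact h0 h1)]
          have : M.toNat = 0 := by omega
          rw [this, List.take_zero]

lemma pvMain (X : List String) (y : List Int) (skip_y : List Int) :
    balance_test_set X y skip_y = balance_test_set_alt X y skip_y := by
  simp only [balance_test_set, balance_test_set_alt]
  cases hmin : PySem.List.min? (PySem.Dict.counter y).keys (fun k => k) with
  | none => rfl
  | some mkey =>
    dsimp only
    set M := (PySem.Dict.counter y).getD mkey 0 with hMdef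
    have hM : 0 ≤ M := by
      rw [hMdef, PySem.Dict.getD_counter]
      exact Int.natCast_nonneg _
    have hA := pvFoldA skip_y M (X.zip y) 0 [] [] PySem.Dict.empty (fun _ => 0)
      (fun v => by simp)
    have hkeep : pvKeep skip_y M (PySem.List.enumerate (X.zip y) 0) (fun _ => 0) =
        pvSpec skip_y M (PySem.List.enumerate (X.zip y) 0) (fun _ => 0) :=
      pvKeep_eq_pvSpec _ _ _ _ _ (fun v _ => by omega)
    have hpw : (pvSpec skip_y M (PySem.List.enumerate (X.zip y) 0) (fun _ => 0)).Pairwise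
        (fun a b => a.1 < b.1) :=
      List.Pairwise.sublist (pvSpec_sublist _ _ _ _) (PySem.List.pairwise_lt_enumerate _ _)
    have hsorted := PySem.List.sorted_eq_of_perm_of_pairwise_lt _ _ (fun t => t.1)
      ((pvChosenPerm skip_y M hM (PySem.List.enumerate (X.zip y) 0)).symm) hpw
    rw [hA.1, hA.2, hkeep, ← hsorted, List.nil_append, List.nil_append]

-- ===== VERDICT (by name: the statement is the Claim_ definition above) =====
theorem balance_test_set_spec : Claim_equal_balance_test_set := by
  intro X y skip_y _ _
  show _ = _
  exact pvMain X y skip_y
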